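-- pv_equiv track=rewrite | github.com/ALBEDO-TABAI/video-expert-analyzer-vnext | scripts/audiovisual/rendering/pdf.py | _coalesce_image_caption_blocks
-- ===== SOURCE A (Python) =====
-- from typing import Any, Dict, List, Optional, Sequence
--
-- def _coalesce_image_caption_blocks(blocks: List[Dict[str, object]]) -> List[Dict[str, object]]:
--     """Merge `image` + (optional spacer) + `*…*` paragraph into `image_with_caption`."""
--     out: List[Dict[str, object]] = []
--     i = 0
--     n = len(blocks)
--     while i < n:
--         block = blocks[i]
--         if block.get("type") == "image":
--             j = i + 1
--             if j < n and blocks[j].get("type") == "spacer":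
--                 j += 1
--             if j < n:
--                 next_block = blocks[j]
--                 if next_block.get("type") == "paragraph" and next_block.get("_caption"):
--                     out.append(
--                         {
--                             "type": "image_with_caption",
--                             "path": block.get("path"),
--                             "caption": next_block.get("text", ""),
--                         }
--                     )
--                     i = j + 1
--                     continue
--         out.append(block)
--         i += 1
--     return out
-- ===== SOURCE B (Python) =====
-- def _coalesce_image_caption_blocks(blocks):
--     """Single forward pass: captions merge into the tail of the output (image, or
--     image under one spacer) instead of looking ahead from the image."""
--     out = []
--     for block in blocks:
--         if block.get("type") == "paragraph" and block.get("_caption"):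
--             if out and out[-1].get("type") == "image":
--                 img = out.pop()
--                 out.append({"type": "image_with_caption",
--                             "path": img.get("path"),
--                             "caption": block.get("text", "")})
--                 continue
--             if len(out) >= 2 and out[-1].get("type") == "spacer" and out[-2].get("type") == "image":
--                 out.pop()
--                 img = out.pop()
--                 out.append({"type": "image_with_caption",
--                             "path": img.get("path"),
--                             "caption": block.get("text", "")})
--                 continue
--         out.append(block)
--     return out
-- ===== Notes on version B (the rewrite author's own statement) =====
-- stated objective: alternative
-- what changed: A scans by index with lookahead from each image block (peek past one spacer for a caption paragraph); B is a single forward pass that, on seeing a caption paragraph, merges it into the tail of the already-built output (last entry an image, or a spacer over an image, which is popped).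
import Mathlib
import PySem

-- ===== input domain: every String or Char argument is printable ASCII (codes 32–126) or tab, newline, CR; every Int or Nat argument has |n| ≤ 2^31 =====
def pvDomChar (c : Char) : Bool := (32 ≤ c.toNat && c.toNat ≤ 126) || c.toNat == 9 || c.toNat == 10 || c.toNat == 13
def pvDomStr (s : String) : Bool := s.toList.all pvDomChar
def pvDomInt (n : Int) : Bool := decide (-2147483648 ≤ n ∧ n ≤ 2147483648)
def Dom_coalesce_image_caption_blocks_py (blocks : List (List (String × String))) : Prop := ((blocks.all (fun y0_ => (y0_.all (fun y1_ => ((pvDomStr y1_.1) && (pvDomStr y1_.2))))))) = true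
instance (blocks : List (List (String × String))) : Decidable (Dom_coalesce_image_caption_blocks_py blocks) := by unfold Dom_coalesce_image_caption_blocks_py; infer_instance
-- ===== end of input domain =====

-- B replaces A's index-based lookahead (image, skip one spacer, peek caption) by a single
-- forward pass that merges a caption paragraph into the tail of the output list (objective: alternative decomposition).


-- ===== PORT A =====
-- block.get(k): first-match lookup in the association list (Python dict has unique keys;
-- on a dict literal this is exact).
def pvGet (d : List (String × String)) (k : String) : Option String :=
  (d.find? (fun p => p.1 == k)).map (·.2)

def pvIsImg (b : List (String × String)) : Bool := pvGet b "type" == some "image"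
def pvIsSpc (b : List (String × String)) : Bool := pvGet b "type" == some "spacer"
-- paragraph with truthy `_caption` (a string is truthy iff nonempty)
def pvIsCap (b : List (String × String)) : Bool :=
  pvGet b "type" == some "paragraph" && !((pvGet b "_caption").getD "" == "")
-- the merged dict literal {"type": …, "path": img.get("path"), "caption": cap.get("text","")}.
-- When the image block has no "path" key Python stores None there; in these String-valued
-- association lists both ports encode that identically as "" (same encoding on both sides).
def pvMerged (img cap : List (String × String)) : List (String × String) :=
  [("type", "image_with_caption"), ("path", (pvGet img "path").getD ""),
   ("caption", (pvGet cap "text").getD "")]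

-- A's while-loop over the index i, as structural recursion on the suffix blocks[i:]
def coalesce_image_caption_blocks_py (blocks : List (List (String × String))) : List (List (String × String)) :=
  match blocks with
  | [] => []
  | b :: rest =>
    if pvIsImg b then
      match rest with
      | x :: rest2 =>
        if pvIsSpc x then
          match rest2 with
          | y :: rest3 =>
            if pvIsCap y then pvMerged b y :: coalesce_image_caption_blocks_py rest3
            else b :: coalesce_image_caption_blocks_py (x :: y :: rest3)
          | [] => b :: coalesce_image_caption_blocks_py [x]
        else if pvIsCap x then pvMerged b x :: coalesce_image_caption_blocks_py rest2
        else b :: coalesce_image_caption_blocks_py (x :: rest2)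
      | [] => [b]
    else b :: coalesce_image_caption_blocks_py rest

-- ===== PORT B =====
-- B keeps `out` and inspects/pops its tail; the Lean accumulator holds `out` REVERSED
-- (head = Python's out[-1]) and is reversed once at the end.
def pvStepB (acc : List (List (String × String))) (b : List (String × String)) : List (List (String × String)) :=
  if pvIsCap b then
    match acc with
    | t :: acc' =>
      if pvIsImg t then pvMerged t b :: acc'
      else
        match acc' with
        | u :: acc'' =>
          if pvIsSpc t && pvIsImg u then pvMerged u b :: acc''
          else b :: acc
        | [] => b :: acc
    | [] => b :: acc
  else b :: acc

def coalesce_image_caption_blocks_py_alt (blocks : List (List (String × String))) : List (List (String × String)) :=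
  (blocks.foldl pvStepB []).reverse

-- ===== PRECONDITION & SPEC =====
-- No Pre_: A is total and B matches it on every input.

def Spec_coalesce_image_caption_blocks_py (blocks : List (List (String × String))) (out : List (List (String × String))) : Prop := out = coalesce_image_caption_blocks_py_alt blocks
instance (blocks : List (List (String × String))) (out : List (List (String × String))) : Decidable (Spec_coalesce_image_caption_blocks_py blocks out) := by unfold Spec_coalesce_image_caption_blocks_py; infer_instance

-- ===== CLAIM (what is proved, stated in full; the proofs are below) =====
def Claim_equal_coalesce_image_caption_blocks_py : Prop := ∀ (blocks : List (List (String × String))), Dom_coalesce_image_caption_blocks_py blocks → Spec_coalesce_image_caption_blocks_py blocks (coalesce_image_caption_blocks_py blocks)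

-- ===== LEMMAS AND PROOFS =====

-- B's step can merge into the accumulator iff its tail is an image, or a spacer over an image
def pvMergeable (acc : List (List (String × String))) : Bool :=
  match acc with
  | t :: u :: _ => pvIsImg t || (pvIsSpc t && pvIsImg u)
  | [t] => pvIsImg t
  | [] => false

def pvHeadImg (acc : List (List (String × String))) : Bool :=
  match acc with | t :: _ => pvIsImg t | [] => false

-- invariant tying B's accumulator to the upcoming blocks: whenever the stream is about to
-- present a caption (directly, or after one spacer), the accumulator offers no stale merge target
def pvGuard (acc blocks : List (List (String × String))) : Prop :=
  (match blocks with
   | p :: _ => pvIsCap p = true → pvMergeable acc = false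
   | [] => True) ∧
  (match blocks with
   | s :: p :: _ => pvIsSpc s = true → pvIsCap p = true → pvHeadImg acc = false
   | _ => True)

theorem pvIsCap_of_img {b : List (String × String)} (h : pvIsImg b = true) : pvIsCap b = false := by
  simp [pvIsImg, pvIsCap] at *
  intro h'
  simp [h] at h'

theorem pvIsCap_of_spc {b : List (String × String)} (h : pvIsSpc b = true) : pvIsCap b = false := by
  simp [pvIsSpc, pvIsCap] at *
  intro h'
  simp [h] at h'

theorem pvIsImg_of_spc {b : List (String × String)} (h : pvIsSpc b = true) : pvIsImg b = false := by
  simp [pvIsSpc, pvIsImg] at *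
  simp [h]

theorem pvIsImg_merged (img cap : List (String × String)) : pvIsImg (pvMerged img cap) = false := by
  simp [pvIsImg, pvMerged, pvGet]

theorem pvIsSpc_merged (img cap : List (String × String)) : pvIsSpc (pvMerged img cap) = false := by
  simp [pvIsSpc, pvMerged, pvGet]

-- the merged block is never a merge target again
theorem pvGuard_merged (i c : List (String × String)) (acc blocks : List (List (String × String))) :
    pvGuard (pvMerged i c :: acc) blocks := by
  constructor
  · cases blocks with
    | nil => trivial
    | cons p r =>
      intro _
      cases acc <;> simp [pvMergeable, pvIsImg_merged, pvIsSpc_merged]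
  · cases blocks with
    | nil => trivial
    | cons p r =>
      cases r with
      | nil => trivial
      | cons q r2 => intro _ _; simp [pvHeadImg, pvIsImg_merged]

theorem pvStepB_nocap (acc : List (List (String × String))) (b : List (String × String))
    (h : pvIsCap b = false) : pvStepB acc b = b :: acc := by
  simp [pvStepB, h]

theorem pvStepB_safe (acc : List (List (String × String))) (b : List (String × String))
    (hm : pvMergeable acc = false) : pvStepB acc b = b :: acc := by
  cases acc with
  | nil => simp [pvStepB]
  | cons t acc' =>
    cases acc' with
    | nil => simp [pvMergeable] at hm; simp [pvStepB, hm]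
    | cons u acc'' =>
      simp [pvMergeable] at hm
      by_cases hs : pvIsSpc t = true
      · simp [pvStepB, hm.1, hs, hm.2 hs]
      · rw [Bool.not_eq_true] at hs
        simp [pvStepB, hm.1, hs]

theorem pvMain : ∀ (blocks acc : List (List (String × String))), pvGuard acc blocks →
    blocks.foldl pvStepB acc = (coalesce_image_caption_blocks_py blocks).reverse ++ acc := by
  intro blocks
  fun_induction coalesce_image_caption_blocks_py blocks with
  | case1 =>
    intro acc _; simp
  | case2 b hImg x hSpc y rest3 hCap ih =>
    -- image, spacer, caption: B appends b and x, then the caption pops the spacer and merges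
    intro acc _
    simp only [List.foldl, pvStepB_nocap _ b (pvIsCap_of_img hImg),
      pvStepB_nocap _ x (pvIsCap_of_spc hSpc)]
    have hstep : pvStepB (x :: b :: acc) y = pvMerged b y :: acc := by
      simp [pvStepB, hCap, pvIsImg_of_spc hSpc, hSpc, hImg]
    rw [hstep, ih (pvMerged b y :: acc) (pvGuard_merged b y acc rest3)]
    simp
  | case3 b hImg x hSpc y rest3 hnCap ih =>
    -- image, spacer, non-caption: A re-reads from the spacer; B just appended the image
    intro acc _
    rw [List.foldl_cons, pvStepB_nocap _ b (pvIsCap_of_img hImg),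
      ih (b :: acc) ⟨by simp [pvIsCap_of_spc hSpc], fun _ hc => absurd hc (by simp [hnCap])⟩]
    simp
  | case4 b hImg x hSpc ih =>
    -- image then trailing spacer
    intro acc _
    rw [List.foldl_cons, pvStepB_nocap _ b (pvIsCap_of_img hImg),
      ih (b :: acc) ⟨by simp [pvIsCap_of_spc hSpc], trivial⟩]
    simp
  | case5 b hImg x rest2 hnSpc hCap ih =>
    -- image directly followed by caption: B merges into the image at out's tail
    intro acc _
    simp only [List.foldl, pvStepB_nocap _ b (pvIsCap_of_img hImg)]
    have hstep : pvStepB (b :: acc) x = pvMerged b x :: acc := by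
      simp [pvStepB, hCap, hImg]
    rw [hstep, ih (pvMerged b x :: acc) (pvGuard_merged b x acc rest2)]
    simp
  | case6 b hImg x rest2 hnSpc hnCap ih =>
    intro acc _
    rw [List.foldl_cons, pvStepB_nocap _ b (pvIsCap_of_img hImg),
      ih (b :: acc) ⟨fun hc => absurd hc (by simp [hnCap]), by
        cases rest2 with
        | nil => trivial
        | cons p r => exact fun hs _ => absurd hs (by simp [hnSpc])⟩]
    simp
  | case7 b hImg =>
    intro acc _
    simp [List.foldl, pvStepB_nocap _ b (pvIsCap_of_img hImg)]
  | case8 b rest hnImg ih =>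
    intro acc hG
    obtain ⟨hG1, hG2⟩ := hG
    have hb : pvStepB acc b = b :: acc := by
      by_cases hc : pvIsCap b = true
      · exact pvStepB_safe acc b (hG1 hc)
      · exact pvStepB_nocap acc b (by simpa using hc)
    have hImgF : pvIsImg b = false := by simpa using hnImg
    simp only [List.foldl, hb]
    rw [ih (b :: acc) ⟨by
        cases rest with
        | nil => trivial
        | cons p r =>
          intro hcp
          cases acc with
          | nil => simp [pvMergeable, hImgF]
          | cons u acc'' =>
            simp [pvMergeable, hImgF]
            intro hbs
            have := hG2 hbs hcp
            simpa [pvHeadImg] using this, by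
        cases rest with
        | nil => trivial
        | cons p r =>
          cases r with
          | nil => trivial
          | cons q r2 => intro _ _; simp [pvHeadImg, hImgF]⟩]
    simp

-- ===== VERDICT (by name: the statement is the Claim_ definition above) =====
theorem coalesce_image_caption_blocks_py_spec : Claim_equal_coalesce_image_caption_blocks_py := by
  intro blocks _
  unfold Spec_coalesce_image_caption_blocks_py coalesce_image_caption_blocks_py_alt
  rw [pvMain blocks [] ⟨by
    cases blocks with
    | nil => trivial
    | cons p r => intro _; simp [pvMergeable], by
    cases blocks with
    | nil => trivial
    | cons a t => cases t with
      | nil => trivial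
      | cons p r => intro _ _; simp [pvHeadImg]⟩]
  simp
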